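-- pv_equiv track=rewrite | github.com/risuan/programming-basic | HW7_2011037202.py | sprice2
-- ===== SOURCE A (Python) =====
-- def add(x,xs):
--   if member1(x,xs):
--     return xs
--   else:
--     return [x] + xs
--
-- def member1(x,xs) :
--   def loop(xs,ss) :
--     if xs == [] : # xs == [] 시 False 출력
--       return False
--     else : # xs != []
--       return (x == xs[0]) or loop(xs[1:],add(xs[0],ss)) # x == xs[0]이면 True 출력, 아니면 그 다음 수로 넘어가기
--   return loop(xs,[]) # xs 초기화
--
-- def sprice2(xs,ys) :
--   ss = [] # ss 초기화
--   while True :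
--     if xs == [] and ys == [] : # xs,ys 둘다 []이면
--       return ss
--       break #  while 끝
--     elif xs == [] or ys == [] : # xs,ys 둘 중에 하나만
--       if len(xs) != 0 : # xs 길이가 0이 아닐 때
--         while len(xs) > 0 : # 0보다 클 동안
--           ss = add([(xs[0],xs[0])],ss) #ss에 추가
--           xs = xs[1:] # x= xs[1:]로 지정
--       elif len(ys) != 0 : # ys 길이가 0이 아닐 때
--         while len(ys) > 0 : # ys 0보다 클 동안
--           ss = add([(ys[0],ys[0])],ss) #ss에 추가
--           ys = ys[1:] # y = ys[1:]로 지정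
--     else : # xs,ys 둘 다 [] 이 아닐 경우
--       ss = add([(xs[0],ys[0])],ss) #ss에 추가
--       xs = xs[1:]  # xs = xs[1:]로 지정
--       ys = ys[1:]  # ys = ys[1:]로 지정
-- ===== SOURCE B (Python) =====
-- def sprice2(xs, ys):
--     # build / dedup (first occurrence) / reverse, then wrap each pair as a singleton list
--     m = min(len(xs), len(ys))
--     pairs = list(zip(xs, ys)) + [(e, e) for e in xs[m:]] + [(e, e) for e in ys[m:]]
--     seen = set()
--     kept = []
--     for p in pairs:
--         if p not in seen:
--             seen.add(p)
--             kept.append(p)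
--     return [[p] for p in reversed(kept)]
-- ===== Notes on version B (the rewrite author's own statement) =====
-- stated objective: faster
-- what changed: A interleaves a prepend-to-accumulator loop with a recursive membership test (member1/add, itself re-running member1 on its accumulator) inside one while-True state machine; B builds the padded pair sequence in one pass (zip plus leftovers), dedups it keeping first occurrences with a seen-set, then reverses and wraps each pair.
import Mathlib
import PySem

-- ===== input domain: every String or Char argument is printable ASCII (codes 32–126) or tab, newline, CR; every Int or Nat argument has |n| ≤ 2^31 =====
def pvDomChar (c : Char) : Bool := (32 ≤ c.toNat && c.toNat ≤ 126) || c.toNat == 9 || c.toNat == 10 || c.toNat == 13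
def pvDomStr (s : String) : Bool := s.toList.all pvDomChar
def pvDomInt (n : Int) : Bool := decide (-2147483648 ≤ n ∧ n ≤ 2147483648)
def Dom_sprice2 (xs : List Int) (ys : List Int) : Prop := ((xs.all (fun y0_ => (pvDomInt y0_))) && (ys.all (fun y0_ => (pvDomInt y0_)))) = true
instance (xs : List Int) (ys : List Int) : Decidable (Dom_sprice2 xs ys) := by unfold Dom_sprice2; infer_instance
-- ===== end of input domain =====

-- B replaces A's interleaved prepend-with-recursive-membership loop by three plain phases
-- (build the pair sequence, dedup keeping first occurrences with a seen-set, reverse and wrap); a timing run measured B faster.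

-- ===== PORT A =====
-- member1's inner loop: loop(xs, ss) = (x == xs[0]) or loop(xs[1:], add(xs[0], ss)),
-- mutually recursive with the module-level `add` (inlined: add(h, ss) = if member1(h, ss) then ss else [h]+ss).
-- Ported with a structural fuel argument bounding the nesting depth; the nested member1 calls only
-- build the accumulator `ss`, which never influences the returned Bool, so xs.length + 2 fuel is exact.
mutual
def member1F : Nat → List (Int × Int) → List (List (Int × Int)) → Bool
  | 0, _, _ => false
  | f + 1, x, xs => loopF f x xs []
def loopF : Nat → List (Int × Int) → List (List (Int × Int)) → List (List (Int × Int)) → Bool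
  | 0, _, _, _ => false
  | f + 1, x, xs, ss =>
    match xs with
    | [] => false
    | h :: t => (x == h) || loopF f x t (if member1F f h ss then ss else h :: ss)
end

def member1A (x : List (Int × Int)) (xs : List (List (Int × Int))) : Bool :=
  member1F (xs.length + 2) x xs

-- module-level add(x, xs)
def addA (x : List (Int × Int)) (xs : List (List (Int × Int))) : List (List (Int × Int)) :=
  if member1A x xs then xs else x :: xs

-- the inner padding `while` loops of sprice2
def padA (zs : List Int) (ss : List (List (Int × Int))) : List (List (Int × Int)) :=
  match zs with
  | [] => ss
  | z :: t => padA t (addA [(z, z)] ss)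

-- the outer `while True` loop of sprice2 (branches in the Python order; after a padding
-- inner `while` the outer loop runs once more with both lists empty and returns ss)
def sprice2Go (xs ys : List Int) (ss : List (List (Int × Int))) : List (List (Int × Int)) :=
  match xs, ys with
  | [], [] => ss
  | x :: xt, [] => padA (x :: xt) ss
  | [], y :: yt => padA (y :: yt) ss
  | x :: xt, y :: yt => sprice2Go xt yt (addA [(x, y)] ss)

def sprice2 (xs : List Int) (ys : List Int) : List (List (Int × Int)) :=
  sprice2Go xs ys []

-- ===== PORT B =====
def sprice2_alt (xs : List Int) (ys : List Int) : List (List (Int × Int)) :=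
  let m : Nat := min xs.length ys.length
  let pairs : List (Int × Int) :=
    xs.zip ys ++ (xs.drop m).map (fun e => (e, e)) ++ (ys.drop m).map (fun e => (e, e))
  let st :=
    pairs.foldl
      (fun (st : PySem.Set (Int × Int) × List (Int × Int)) p =>
        if PySem.Set.contains st.1 p then st else (PySem.Set.add st.1 p, st.2 ++ [p]))
      (PySem.Set.empty, [])
  (st.2.reverse).map (fun p => [p])

-- ===== PRECONDITION & SPEC =====
def Spec_sprice2 (xs : List Int) (ys : List Int) (out : List (List (Int × Int))) : Prop := out = sprice2_alt xs ys
instance (xs : List Int) (ys : List Int) (out : List (List (Int × Int))) : Decidable (Spec_sprice2 xs ys out) := by unfold Spec_sprice2; infer_instance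

-- ===== CLAIM (what is proved, stated in full; the proofs are below) =====
def Claim_equal_sprice2 : Prop := ∀ (xs : List Int) (ys : List Int), Dom_sprice2 xs ys → Spec_sprice2 xs ys (sprice2 xs ys)

-- ===== LEMMAS AND PROOFS =====

-- member1's loop ignores its accumulator: with enough fuel it is plain list membership
theorem loopF_eq_contains (x : List (Int × Int)) (xs : List (List (Int × Int))) :
    ∀ (f : Nat) (ss : List (List (Int × Int))), xs.length < f →
      loopF f x xs ss = xs.contains x := by
  induction xs with
  | nil =>
    intro f ss hf
    match f, hf with
    | g + 1, _ => simp [loopF]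
  | cons h t ih =>
    intro f ss hf
    match f, hf with
    | g + 1, hf =>
      simp only [loopF, List.contains_cons]
      rw [ih g _ (by simpa using Nat.lt_of_succ_lt_succ hf)]

theorem member1A_eq_contains (x : List (Int × Int)) (xs : List (List (Int × Int))) :
    member1A x xs = xs.contains x := by
  unfold member1A
  show loopF (xs.length + 1) x xs [] = xs.contains x
  exact loopF_eq_contains x xs (xs.length + 1) [] (Nat.lt_succ_self _)

theorem addA_eq (x : List (Int × Int)) (xs : List (List (Int × Int))) :
    addA x xs = if xs.contains x then xs else x :: xs := by
  rw [addA, member1A_eq_contains]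

-- the pair sequence both programs process, in order
def pairsAB (xs ys : List Int) : List (Int × Int) :=
  let m : Nat := min xs.length ys.length
  xs.zip ys ++ (xs.drop m).map (fun e => (e, e)) ++ (ys.drop m).map (fun e => (e, e))

def stepA (ss : List (List (Int × Int))) (p : Int × Int) : List (List (Int × Int)) :=
  addA [p] ss

theorem padA_eq_foldl (zs : List Int) (ss : List (List (Int × Int))) :
    padA zs ss = (zs.map (fun z => (z, z))).foldl stepA ss := by
  induction zs generalizing ss with
  | nil => simp [padA]
  | cons z t ih => simp [padA, ih, stepA]

theorem pairsAB_cons (x y : Int) (xt yt : List Int) :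
    pairsAB (x :: xt) (y :: yt) = (x, y) :: pairsAB xt yt := by
  have hm : min (xt.length + 1) (yt.length + 1) = min xt.length yt.length + 1 := by omega
  simp [pairsAB, hm]

theorem sprice2Go_eq_foldl (xs ys : List Int) (ss : List (List (Int × Int))) :
    sprice2Go xs ys ss = (pairsAB xs ys).foldl stepA ss := by
  induction xs generalizing ys ss with
  | nil =>
    cases ys with
    | nil => simp [sprice2Go, pairsAB]
    | cons y yt => simp [sprice2Go, pairsAB, padA_eq_foldl]
  | cons x xt ih =>
    cases ys with
    | nil => simp [sprice2Go, pairsAB, padA_eq_foldl]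
    | cons y yt =>
      rw [sprice2Go, ih, pairsAB_cons, List.foldl_cons]
      rfl

def stepB (st : PySem.Set (Int × Int) × List (Int × Int)) (p : Int × Int) :
    PySem.Set (Int × Int) × List (Int × Int) :=
  if PySem.Set.contains st.1 p then st else (PySem.Set.add st.1 p, st.2 ++ [p])

-- the two folds stay related: A's accumulator is B's kept list, reversed and wrapped
theorem fold_rel (ps : List (Int × Int)) (ss : List (List (Int × Int)))
    (s : PySem.Set (Int × Int)) (k : List (Int × Int))
    (hss : ss = (k.map (fun p => [p])).reverse)
    (hm : ∀ q : Int × Int, [q] ∈ ss ↔ q ∈ s) :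
    ps.foldl stepA ss = (((ps.foldl stepB (s, k)).2).map (fun p => [p])).reverse := by
  induction ps generalizing ss s k with
  | nil => simp [hss]
  | cons p t ih =>
    simp only [List.foldl_cons, stepA, stepB, addA_eq]
    have hcond : ss.contains [p] = PySem.Set.contains s p := by
      rw [List.contains_eq_mem, PySem.Set.contains_eq_listContains, List.contains_eq_mem]
      simp [hm p]
    rw [hcond]
    by_cases h : PySem.Set.contains s p = true
    · rw [if_pos h, if_pos h]
      exact ih ss s k hss hm
    · rw [if_neg h, if_neg h]
      apply ih
      · simp [hss]
      · intro q
        simp [PySem.Set.mem_add, hm q, or_comm]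

-- ===== VERDICT (by name: the statement is the Claim_ definition above) =====
theorem sprice2_spec : Claim_equal_sprice2 := by
  intro xs ys _
  unfold Spec_sprice2 sprice2 sprice2_alt
  rw [sprice2Go_eq_foldl,
    fold_rel (pairsAB xs ys) [] PySem.Set.empty []
      (by simp) (by intro q; simp [PySem.Set.empty])]
  simp only [pairsAB, PySem.Set.empty, List.map_reverse]
  rfl
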